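-- pv_equiv track=rewrite | github.com/Techmokid/My-Projects | Completed Projects/My NEAT/coinbase_handler.py | stripValueFromJSONLine
-- ===== SOURCE A (Python) =====
-- def stripValueFromJSONLine(x,key=False):
--     running = False
--     currentSentence = ""
--     loops = 0
--     if (key):
--         loops = 1
--     for i in x:
--         if (running and i != '"'):
--             currentSentence += i
--         if (i == '"'):
--             running = not running
--             if (running == False):
--                 loops += 1
--                 if (loops == 2):
--                     return currentSentence
--                 currentSentence = ""
-- ===== SOURCE B (Python) =====
-- def stripValueFromJSONLine(x, key=False):
--     parts = x.split('"')
--     idx = 1 if key else 3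
--     if len(parts) > idx + 1:
--         return parts[idx]
--     return None
-- ===== Notes on version B (the rewrite author's own statement) =====
-- stated objective: faster
-- what changed: Replaced the char-by-char quote-toggling state machine with a single split on the double-quote character followed by direct indexing of the desired odd-position segment, guarded by a length check that ensures the segment is closed.
import Mathlib
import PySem

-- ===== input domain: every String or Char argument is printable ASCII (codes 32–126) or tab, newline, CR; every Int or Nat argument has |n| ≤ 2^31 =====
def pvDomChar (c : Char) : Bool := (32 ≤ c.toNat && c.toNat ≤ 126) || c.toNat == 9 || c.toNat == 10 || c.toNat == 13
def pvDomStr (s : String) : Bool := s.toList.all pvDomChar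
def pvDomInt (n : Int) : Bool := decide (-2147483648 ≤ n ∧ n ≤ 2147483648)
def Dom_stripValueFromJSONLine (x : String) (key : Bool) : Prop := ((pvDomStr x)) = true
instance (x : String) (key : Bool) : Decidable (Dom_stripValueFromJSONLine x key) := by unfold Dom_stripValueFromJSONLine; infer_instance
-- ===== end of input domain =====

-- B replaces A's char-by-char quote-toggling state machine by one split on the quote
-- character plus a guarded index into the odd-position segments (measured faster: the
-- split is a single C-level pass instead of a Python-level per-character loop).

-- ===== PORT A =====
-- the for-loop of A: state (running, currentSentence, loops); early return becomes `some`,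
-- falling off the loop end becomes `none` (the Python function returns None implicitly)
def pvLoopA : List Char → Bool → List Char → Nat → Option String
  | [], _, _, _ => none
  | c :: rest, running, cur, loops =>
    let cur1 := if running && (c ≠ '"') then cur ++ [c] else cur
    if c = '"' then
      if (!running) = false then
        -- running was true: quote closes, loops += 1
        if loops + 1 = 2 then some (String.ofList cur1)
        else pvLoopA rest false [] (loops + 1)
      else pvLoopA rest true cur1 loops
    else pvLoopA rest running cur1 loops

def stripValueFromJSONLine (x : String) (key : Bool) : Option String :=
  pvLoopA x.toList false [] (if key then 1 else 0)

-- ===== PORT B =====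
def stripValueFromJSONLine_alt (x : String) (key : Bool) : Option String :=
  let parts : List String := (PySem.Chars.splitOn x.toList "\"".toList).map String.ofList
  let idx : Nat := if key then 1 else 3
  if parts.length > idx + 1 then PySem.List.pyGet? parts (idx : Int) else none

-- ===== PRECONDITION & SPEC =====
def Spec_stripValueFromJSONLine (x : String) (key : Bool) (out : Option String) : Prop := out = stripValueFromJSONLine_alt x key
instance (x : String) (key : Bool) (out : Option String) : Decidable (Spec_stripValueFromJSONLine x key out) := by unfold Spec_stripValueFromJSONLine; infer_instance

-- ===== CLAIM (what is proved, stated in full; the proofs are below) =====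
def Claim_equal_stripValueFromJSONLine : Prop := ∀ (x : String) (key : Bool), Dom_stripValueFromJSONLine x key → Spec_stripValueFromJSONLine x key (stripValueFromJSONLine x key)

-- ===== LEMMAS AND PROOFS =====

-- structural-recursion version of splitting a char list at '"'
def pvSplit : List Char → List (List Char)
  | [] => [[]]
  | c :: r =>
    if c = '"' then [] :: pvSplit r
    else (c :: (pvSplit r).headD []) :: (pvSplit r).tail

theorem pvSplit_ne_nil (l : List Char) : pvSplit l ≠ [] := by
  cases l with
  | nil => simp [pvSplit]
  | cons c r => by_cases hc : c = '"' <;> simp [pvSplit, hc]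

-- PySem's fuel-based splitOn.go computes pvSplit (single-char separator '"')
theorem pvGo_eq (l : List Char) : ∀ (fuel : Nat) (cur : List Char) (acc : List (List Char)),
    l.length < fuel →
    PySem.Chars.splitOn.go ['"'] fuel l cur acc
      = acc.reverse ++ (cur.reverse ++ (pvSplit l).headD []) :: (pvSplit l).tail := by
  induction l with
  | nil =>
    intro fuel cur acc h
    match fuel, h with
    | fuel + 1, _ => simp [PySem.Chars.splitOn.go, pvSplit]
  | cons c r ih =>
    intro fuel cur acc h
    match fuel, h with
    | fuel + 1, h =>
      have hne := pvSplit_ne_nil r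
      by_cases hc : c = '"'
      · subst hc
        have hgo := ih fuel [] ((cur.reverse) :: acc) (by simpa using h)
        rcases hs : pvSplit r with _ | ⟨a, t⟩
        · exact absurd hs hne
        · simp [PySem.Chars.splitOn.go, List.isPrefixOf, pvSplit, hgo, hs]
      · have := ih fuel (c :: cur) acc (by simpa using h)
        simp [PySem.Chars.splitOn.go, List.isPrefixOf, hc, pvSplit, this]
        exact fun h' => absurd h'.symm hc

theorem pvSplitOn_eq (l : List Char) : PySem.Chars.splitOn l ['"'] = pvSplit l := by
  have h := pvGo_eq l (l.length + 1) [] [] (by omega)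
  have hne := pvSplit_ne_nil l
  rw [PySem.Chars.splitOn, h]
  cases hs : pvSplit l with
  | nil => exact absurd hs hne
  | cons p ps => simp

-- step lemmas for the two recursions
theorem pvLoopA_step_open (r : List Char) (cur : List Char) (loops : Nat) :
    pvLoopA ('"' :: r) false cur loops = pvLoopA r true cur loops := by
  simp [pvLoopA]

theorem pvLoopA_step_close (r : List Char) (cur : List Char) (loops : Nat) :
    pvLoopA ('"' :: r) true cur loops
      = if loops + 1 = 2 then some (String.ofList cur) else pvLoopA r false [] (loops + 1) := by
  simp [pvLoopA]

theorem pvLoopA_step_true (c : Char) (r : List Char) (cur : List Char) (loops : Nat)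
    (hc : c ≠ '"') : pvLoopA (c :: r) true cur loops = pvLoopA r true (cur ++ [c]) loops := by
  simp [pvLoopA, hc]

theorem pvLoopA_step_false (c : Char) (r : List Char) (cur : List Char) (loops : Nat)
    (hc : c ≠ '"') : pvLoopA (c :: r) false cur loops = pvLoopA r false cur loops := by
  simp [pvLoopA, hc]

theorem pvSplit_quote (r : List Char) : pvSplit ('"' :: r) = [] :: pvSplit r := by
  simp [pvSplit]

theorem pvSplit_other (c : Char) (r : List Char) (hc : c ≠ '"') :
    pvSplit (c :: r) = (c :: (pvSplit r).headD []) :: (pvSplit r).tail := by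
  simp [pvSplit, hc]

-- the four reachable loop states of A, characterised by pvSplit of the remaining input
theorem pvLoopA_char (l : List Char) : ∀ (cur : List Char),
    (pvLoopA l true cur 1
       = match pvSplit l with
         | p :: _ :: _ => some (String.ofList (cur ++ p))
         | _ => none)
  ∧ (pvLoopA l false cur 1
       = match pvSplit l with
         | _ :: p :: _ :: _ => some (String.ofList (cur ++ p))
         | _ => none)
  ∧ (pvLoopA l true cur 0
       = match pvSplit l with
         | _ :: _ :: p :: _ :: _ => some (String.ofList p)
         | _ => none)
  ∧ (pvLoopA l false cur 0
       = match pvSplit l with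
         | _ :: _ :: _ :: p :: _ :: _ => some (String.ofList p)
         | _ => none) := by
  induction l with
  | nil => intro cur; simp [pvLoopA, pvSplit]
  | cons c r ih =>
    intro cur
    have hne := pvSplit_ne_nil r
    by_cases hc : c = '"'
    · subst hc
      have h1 := (ih cur).1
      have h2 := (ih ([] : List Char)).2.1
      have h3 := (ih cur).2.2.1
      clear ih
      refine ⟨?_, ?_, ?_, ?_⟩
      · -- closing quote with loops = 1: return cur
        rw [pvLoopA_step_close, if_pos (by norm_num), pvSplit_quote]
        rcases hs : pvSplit r with _ | ⟨a0, t0⟩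
        · exact absurd hs hne
        · simp
      · -- opening quote from (false, 1): go to (true, 1), cur kept
        rw [pvLoopA_step_open, h1, pvSplit_quote]
        rcases pvSplit r with _ | ⟨a0, _ | ⟨a1, t1⟩⟩ <;> simp
      · -- closing quote with loops = 0: reset cur, go to (false, 1)
        rw [pvLoopA_step_close, if_neg (by norm_num), show (0 + 1 = 1) from rfl, h2,
          pvSplit_quote]
        rcases pvSplit r with _ | ⟨a0, _ | ⟨a1, _ | ⟨a2, t2⟩⟩⟩ <;> simp
      · -- opening quote from (false, 0): go to (true, 0)
        rw [pvLoopA_step_open, h3, pvSplit_quote]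
        rcases pvSplit r with _ | ⟨a0, _ | ⟨a1, _ | ⟨a2, _ | ⟨a3, t3⟩⟩⟩⟩ <;> simp
    · have h1 := (ih (cur ++ [c])).1
      have h2 := (ih cur).2.1
      have h3 := (ih (cur ++ [c])).2.2.1
      have h4 := (ih cur).2.2.2
      clear ih
      refine ⟨?_, ?_, ?_, ?_⟩
      · rw [pvLoopA_step_true c r cur 1 hc, h1, pvSplit_other c r hc]
        rcases pvSplit r with _ | ⟨a0, _ | ⟨a1, t1⟩⟩ <;> simp
      · rw [pvLoopA_step_false c r cur 1 hc, h2, pvSplit_other c r hc]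
        rcases pvSplit r with _ | ⟨a0, _ | ⟨a1, _ | ⟨a2, t2⟩⟩⟩ <;> simp
      · rw [pvLoopA_step_true c r cur 0 hc, h3, pvSplit_other c r hc]
        rcases pvSplit r with _ | ⟨a0, _ | ⟨a1, _ | ⟨a2, _ | ⟨a3, t3⟩⟩⟩⟩ <;> simp
      · rw [pvLoopA_step_false c r cur 0 hc, h4, pvSplit_other c r hc]
        rcases pvSplit r with _ | ⟨a0, _ | ⟨a1, _ | ⟨a2, _ | ⟨a3, _ | ⟨a4, t4⟩⟩⟩⟩⟩ <;> simp

-- ===== VERDICT (by name: the statement is the Claim_ definition above) =====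
theorem stripValueFromJSONLine_spec : Claim_equal_stripValueFromJSONLine := by
  intro x key _
  unfold Spec_stripValueFromJSONLine stripValueFromJSONLine stripValueFromJSONLine_alt
  rw [show ("\"".toList) = ['"'] from rfl, pvSplitOn_eq]
  cases key with
  | false =>
    have h := (pvLoopA_char x.toList ([] : List Char)).2.2.2
    simp only [Bool.false_eq_true, if_false]
    rw [h]
    rcases pvSplit x.toList with _ | ⟨p0, _ | ⟨p1, _ | ⟨p2, _ | ⟨p3, _ | ⟨p4, t⟩⟩⟩⟩⟩ <;>
        simp [PySem.List.pyGet?, PySem.List.pyIdx?] <;>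
      (rw [if_pos (by push_cast; omega)]; simp)
  | true =>
    have h := (pvLoopA_char x.toList ([] : List Char)).2.1
    simp only [if_true]
    rw [h]
    rcases pvSplit x.toList with _ | ⟨p0, _ | ⟨p1, _ | ⟨p2, t⟩⟩⟩ <;>
        simp [PySem.List.pyGet?, PySem.List.pyIdx?] <;>
      (rw [if_pos (by push_cast; omega)]; simp)
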